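-- pv_equiv track=rewrite | github.com/sourabh-iit/turing-data-processing | script.py | extra_opening_brackets
-- ===== SOURCE A (Python) =====
-- def extra_opening_brackets(line):
--   """ returns number number of opened brackets """
--   extra_op_brackets = 0
--   for c in line.strip():
--     if c=='(' or c=='[' or c=='{':
--       extra_op_brackets += 1
--     elif c==')' or c==']' or c=='}':
--       extra_op_brackets -= 1
--   return extra_op_brackets
-- ===== SOURCE B (Python) =====
-- def extra_opening_brackets(line):
--   """ returns number number of opened brackets """
--   def bal(s, lo, hi):
--     # net bracket balance of s[lo:hi], by divide and conquer:
--     # balance is additive over concatenation, so split at the midpoint.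
--     if hi - lo == 0:
--       return 0
--     if hi - lo == 1:
--       c = s[lo]
--       if c in '([{':
--         return 1
--       if c in ')]}':
--         return -1
--       return 0
--     mid = (lo + hi) // 2
--     return bal(s, lo, mid) + bal(s, mid, hi)
--   s = line.strip()
--   return bal(s, 0, len(s))
-- ===== Notes on version B (the rewrite author's own statement) =====
-- stated objective: alternative
-- what changed: A's single left-to-right loop with a running accumulator is replaced by a divide-and-conquer recursion: the stripped line is split at the midpoint and the two halves' balances (base case: one character mapped to +1/-1/0) are summed, which is correct because the bracket balance is additive over concatenation.
import Mathlib
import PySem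

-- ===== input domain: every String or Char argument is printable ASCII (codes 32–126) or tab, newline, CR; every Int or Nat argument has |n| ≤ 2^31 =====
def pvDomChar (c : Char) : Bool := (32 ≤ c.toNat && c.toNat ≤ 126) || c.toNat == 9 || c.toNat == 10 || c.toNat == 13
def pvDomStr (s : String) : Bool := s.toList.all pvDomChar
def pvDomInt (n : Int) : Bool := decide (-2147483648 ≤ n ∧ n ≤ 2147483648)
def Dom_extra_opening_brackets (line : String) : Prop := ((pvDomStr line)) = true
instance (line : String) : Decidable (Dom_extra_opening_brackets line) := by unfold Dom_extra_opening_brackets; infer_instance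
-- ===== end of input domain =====

-- B replaces A's single accumulator loop by a midpoint divide-and-conquer recursion
-- (balance is additive over concatenation); objective: alternative, same O(n) cost.


-- ===== PORT A =====
-- literal port of A: fold over the stripped line, +1 on an opener, -1 on a closer
def extra_opening_brackets (line : String) : Int :=
  (PySem.Str.strip line).toList.foldl
    (fun extra_op_brackets c =>
      if c == '(' || c == '[' || c == '{' then extra_op_brackets + 1
      else if c == ')' || c == ']' || c == '}' then extra_op_brackets - 1
      else extra_op_brackets) 0

-- ===== PORT B =====
-- literal port of B's helper bal: balance of s[lo:hi] by splitting at (lo+hi)//2.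
-- 'fuel' only makes the recursion structural (fuel ≥ hi-lo on every call, so the 0 branch
-- is never reached); indices stay in range (lo < hi ≤ len s on every base-case call), so
-- s.getD lo ' ' is exactly Python's s[lo] there.
def pvBalGo (s : List Char) (fuel lo hi : Nat) : Int :=
  match fuel with
  | 0 => 0
  | fuel + 1 =>
    if hi - lo = 0 then 0
    else if hi - lo = 1 then
      let c := s.getD lo ' '
      if c == '(' || c == '[' || c == '{' then 1
      else if c == ')' || c == ']' || c == '}' then -1
      else 0
    else
      pvBalGo s fuel lo ((lo + hi) / 2) + pvBalGo s fuel ((lo + hi) / 2) hi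

def extra_opening_brackets_alt (line : String) : Int :=
  let s := (PySem.Str.strip line).toList
  pvBalGo s s.length 0 s.length

-- ===== PRECONDITION & SPEC =====
def Spec_extra_opening_brackets (line : String) (out : Int) : Prop := out = extra_opening_brackets_alt line
instance (line : String) (out : Int) : Decidable (Spec_extra_opening_brackets line out) := by unfold Spec_extra_opening_brackets; infer_instance

-- ===== CLAIM (what is proved, stated in full; the proofs are below) =====
def Claim_equal_extra_opening_brackets : Prop := ∀ (line : String), Dom_extra_opening_brackets line → Spec_extra_opening_brackets line (extra_opening_brackets line)

-- ===== LEMMAS AND PROOFS =====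

-- the net balance of a list of characters, as counts
def pvVal (l : List Char) : Int :=
  ((l.count '(' : Int) + l.count '[' + l.count '{')
    - ((l.count ')' : Int) + l.count ']' + l.count '}')

theorem pvVal_append (l1 l2 : List Char) : pvVal (l1 ++ l2) = pvVal l1 + pvVal l2 := by
  simp [pvVal, List.count_append]; ring

-- A's fold computes pvVal
theorem pv_foldl_balance (l : List Char) (acc : Int) :
    l.foldl
      (fun extra_op_brackets c =>
        if c == '(' || c == '[' || c == '{' then extra_op_brackets + 1
        else if c == ')' || c == ']' || c == '}' then extra_op_brackets - 1
        else extra_op_brackets) acc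
    = acc + pvVal l := by
  induction l generalizing acc with
  | nil => simp [pvVal]
  | cons x t ih =>
    simp only [List.foldl_cons, List.count_cons, ih, pvVal]
    by_cases h1 : x = '(' <;> by_cases h2 : x = '[' <;> by_cases h3 : x = '{' <;>
      by_cases h4 : x = ')' <;> by_cases h5 : x = ']' <;> by_cases h6 : x = '}' <;>
      simp_all <;> ring

-- pvVal of a single character is B's base-case delta
theorem pvVal_singleton (c : Char) :
    pvVal [c] = (if c == '(' || c == '[' || c == '{' then (1 : Int)
      else if c == ')' || c == ']' || c == '}' then -1 else 0) := by
  by_cases h1 : c = '(';  · subst h1; decide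
  by_cases h2 : c = '[';  · subst h2; decide
  by_cases h3 : c = '{';  · subst h3; decide
  by_cases h4 : c = ')';  · subst h4; decide
  by_cases h5 : c = ']';  · subst h5; decide
  by_cases h6 : c = '}';  · subst h6; decide
  simp [pvVal, beq_iff_eq, h1, h2, h3, h4, h5, h6]

-- B's divide-and-conquer computes pvVal of the segment s[lo:hi] (given enough fuel)
theorem pvBalGo_eq_val (s : List Char) :
    ∀ fuel lo hi, hi - lo ≤ fuel → lo ≤ hi → hi ≤ s.length →
      pvBalGo s fuel lo hi = pvVal ((s.drop lo).take (hi - lo)) := by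
  intro fuel
  induction fuel with
  | zero =>
    intro lo hi hf _ _
    have h0 : hi - lo = 0 := by omega
    simp [pvBalGo, h0, pvVal]
  | succ n ih =>
    intro lo hi hf hle hlen
    rw [pvBalGo]
    by_cases h0 : hi - lo = 0
    · simp [h0, pvVal]
    · rw [if_neg h0]
      by_cases h1 : hi - lo = 1
      · rw [if_pos h1, h1]
        have hlt : lo < s.length := by omega
        rw [List.drop_eq_getElem_cons hlt]
        simp only [List.take_succ_cons, List.take_zero]
        rw [List.getD_eq_getElem s ' ' hlt, pvVal_singleton]
      · rw [if_neg h1]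
        set mid := (lo + hi) / 2 with hmid
        have hb : lo < mid ∧ mid < hi := by omega
        rw [ih lo mid (by omega) (by omega) (by omega),
            ih mid hi (by omega) (by omega) (by omega)]
        have hsplit : (s.drop lo).take (hi - lo)
            = (s.drop lo).take (mid - lo) ++ ((s.drop lo).drop (mid - lo)).take (hi - mid) := by
          have h2 : hi - lo = (mid - lo) + (hi - mid) := by omega
          rw [h2, List.take_add]
        have hdd : (s.drop lo).drop (mid - lo) = s.drop mid := by
          rw [List.drop_drop]; congr 1; omega
        rw [hsplit, pvVal_append, hdd]

-- ===== VERDICT (by name: the statement is the Claim_ definition above) =====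
theorem extra_opening_brackets_spec : Claim_equal_extra_opening_brackets := by
  intro line _
  unfold Spec_extra_opening_brackets extra_opening_brackets extra_opening_brackets_alt
  rw [pv_foldl_balance,
    pvBalGo_eq_val _ _ 0 _ (by omega) (Nat.zero_le _) le_rfl]
  simp
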